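-- pv_equiv track=rewrite | github.com/lukenawara/it-python | htmlcount.py | count_tags
-- ===== SOURCE A (Python) =====
-- def count_tags(text):
--     count = 0
--     previous_char = None
--     for char in text:
--         if char != "/" and previous_char == "<":
--             count += 1
--         previous_char = char
--     return count
-- ===== SOURCE B (Python) =====
-- def count_tags(text):
--     return text.count("<") - text.count("</") - (1 if text.endswith("<") else 0)
-- ===== Notes on version B (the rewrite author's own statement) =====
-- stated objective: faster
-- what changed: Replaces the stateful previous-char loop by three whole-string substring operations: count('<') minus count('</') minus one if the text ends with '<'.
import Mathlib
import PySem

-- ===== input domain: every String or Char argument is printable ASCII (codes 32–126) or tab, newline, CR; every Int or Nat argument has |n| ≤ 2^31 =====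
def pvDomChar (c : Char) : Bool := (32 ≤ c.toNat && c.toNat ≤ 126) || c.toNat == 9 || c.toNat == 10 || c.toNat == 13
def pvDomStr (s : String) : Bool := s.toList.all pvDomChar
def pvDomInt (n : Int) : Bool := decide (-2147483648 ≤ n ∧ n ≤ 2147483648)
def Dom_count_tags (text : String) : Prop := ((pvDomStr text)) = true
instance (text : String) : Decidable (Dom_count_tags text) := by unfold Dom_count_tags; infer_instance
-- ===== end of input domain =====

-- B replaces A's stateful previous-char loop by three whole-string substring
-- operations (count - count - endswith); measured faster (C-level scans vs per-char loop).

-- ===== PORT A =====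
def count_tags (text : String) : Int :=
  (text.toList.foldl
    (fun (st : Int × Option Char) char =>
      (if char ≠ '/' ∧ st.2 = some '<' then st.1 + 1 else st.1, some char))
    (0, none)).1

-- ===== PORT B =====
def count_tags_alt (text : String) : Int :=
  (PySem.Str.count text "<" : Int) - (PySem.Str.count text "</" : Int) -
    (if PySem.Str.endswith text "<" then 1 else 0)

-- ===== PRECONDITION & SPEC =====
def Spec_count_tags (text : String) (out : Int) : Prop := out = count_tags_alt text
instance (text : String) (out : Int) : Decidable (Spec_count_tags text out) := by unfold Spec_count_tags; infer_instance

-- ===== CLAIM (what is proved, stated in full; the proofs are below) =====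
def Claim_equal_count_tags : Prop := ∀ (text : String), Dom_count_tags text → Spec_count_tags text (count_tags text)

-- ===== LEMMAS AND PROOFS =====

-- A's loop, written as a plain recursion over (acc, previous_char).
def pvLoopA : Int → Option Char → List Char → Int
  | acc, _, [] => acc
  | acc, prev, c :: t =>
      pvLoopA (if c ≠ '/' ∧ prev = some '<' then acc + 1 else acc) (some c) t

-- '</'-pair count, structural.
def pvPairs : List Char → Nat
  | [] => 0
  | [_] => 0
  | a :: b :: t => (if a = '<' ∧ b = '/' then 1 else 0) + pvPairs (b :: t)

theorem pvLoopA_foldl (cs : List Char) (acc : Int) (prev : Option Char) :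
    (cs.foldl
      (fun (st : Int × Option Char) char =>
        (if char ≠ '/' ∧ st.2 = some '<' then st.1 + 1 else st.1, some char))
      (acc, prev)).1 = pvLoopA acc prev cs := by
  induction cs generalizing acc prev with
  | nil => rfl
  | cons c t ih => simp [pvLoopA, List.foldl, ih]

theorem pvLoopA_add (cs : List Char) (prev : Option Char) (acc k : Int) :
    pvLoopA (acc + k) prev cs = pvLoopA acc prev cs + k := by
  induction cs generalizing acc prev with
  | nil => rfl
  | cons c t ih =>
      simp only [pvLoopA]
      split_ifs with h
      · rw [show acc + k + 1 = (acc + 1) + k by ring, ih]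
      · exact ih _ _

theorem pvLoopA_single (c : Char) : pvLoopA 0 none [c] = 0 := by
  simp [pvLoopA]

theorem pvLoopA_cons2 (c d : Char) (u : List Char) :
    pvLoopA 0 none (c :: d :: u) =
      pvLoopA 0 none (d :: u) + (if c = '<' ∧ d ≠ '/' then 1 else 0) := by
  have hnone : ((none : Option Char) = some '<') = False := by simp
  simp only [pvLoopA, hnone, and_false, if_false]
  by_cases hc : c = '<' <;> by_cases hd : d = '/'
  · simp [hc, hd]
  · have hcond : (if d ≠ '/' ∧ some c = some '<' then (0 : Int) + 1 else 0) = 0 + 1 := by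
      simp [hc, hd]
    rw [hcond, pvLoopA_add]
    simp [hc, hd]
  · simp [hc, hd]
  · simp [hc, hd]

-- Chars.count with single-char pattern '<' is List.count.
theorem pvCountGo_lt (fuel : Nat) (l : List Char) (acc : Nat)
    (h : l.length ≤ fuel) :
    PySem.Chars.count.go ['<'] fuel l acc = acc + l.count '<' := by
  induction fuel generalizing l acc with
  | zero =>
      cases l with
      | nil => simp [PySem.Chars.count.go]
      | cons c t => simp at h
  | succ n ih =>
      cases l with
      | nil => simp [PySem.Chars.count.go]
      | cons c t =>
          simp only [PySem.Chars.count.go]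
          by_cases hc : c = '<'
          · have hpre : (['<'].isPrefixOf (c :: t)) = true := by
              simp [List.isPrefixOf, hc]
            simp only [hpre, if_true]
            have hdrop : List.drop (['<'] : List Char).length (c :: t) = t := rfl
            rw [hdrop, ih t (acc + 1) (by simp at h; omega)]
            simp [List.count_cons, hc]; omega
          · have hpre : (['<'].isPrefixOf (c :: t)) = false := by
              simp only [List.isPrefixOf, List.isPrefixOf_nil_left, Bool.and_true,
                beq_eq_false_iff_ne, ne_eq]
              exact fun h => hc h.symm
            simp only [hpre, Bool.false_eq_true, if_false]
            rw [ih t acc (by simp at h; omega)]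
            have : (c :: t).count '<' = t.count '<' := by
              simp [fun h => hc (h : c = '<')]
            rw [this]

theorem pvCount_lt (cs : List Char) :
    PySem.Chars.count cs ['<'] = cs.count '<' := by
  simp [PySem.Chars.count, pvCountGo_lt cs.length cs 0 le_rfl]

theorem pvPairs_slash (t : List Char) :
    pvPairs ('/' :: t) = pvPairs t := by
  cases t with
  | nil => rfl
  | cons d u => simp [pvPairs]

theorem pvCountGo_ltslash (fuel : Nat) (l : List Char) (acc : Nat)
    (h : l.length ≤ fuel) :
    PySem.Chars.count.go ['<', '/'] fuel l acc = acc + pvPairs l := by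
  induction fuel generalizing l acc with
  | zero =>
      cases l with
      | nil => simp [PySem.Chars.count.go, pvPairs]
      | cons c t => simp at h
  | succ n ih =>
      cases l with
      | nil => simp [PySem.Chars.count.go, pvPairs]
      | cons c t =>
          simp only [PySem.Chars.count.go]
          by_cases hp : (['<', '/'].isPrefixOf (c :: t)) = true
          · obtain ⟨u, hc, ht⟩ : ∃ u, c = '<' ∧ t = '/' :: u := by
              cases t with
              | nil => simp [List.isPrefixOf] at hp
              | cons d u =>
                  simp only [List.isPrefixOf, Bool.and_eq_true, beq_iff_eq] at hp
                  exact ⟨u, hp.1.symm, by rw [← hp.2.1]⟩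
            subst ht; subst hc
            simp only [hp, if_true]
            have hdrop :
                List.drop (['<', '/'] : List Char).length ('<' :: '/' :: u) = u := rfl
            rw [hdrop, ih u (acc + 1) (by simp at h; omega)]
            have : pvPairs ('<' :: '/' :: u) = 1 + pvPairs u := by
              simp [pvPairs, pvPairs_slash]
            rw [this]; omega
          · simp only [Bool.not_eq_true] at hp
            simp only [hp, Bool.false_eq_true, if_false]
            rw [ih t acc (by simp at h; omega)]
            cases t with
            | nil => simp [pvPairs]
            | cons d u =>
                have : ¬ (c = '<' ∧ d = '/') := by
                  rintro ⟨h1, h2⟩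
                  subst h1; subst h2
                  simp [List.isPrefixOf] at hp
                simp [pvPairs, this]

theorem pvCount_ltslash (cs : List Char) :
    PySem.Chars.count cs ['<', '/'] = pvPairs cs := by
  simp [PySem.Chars.count, pvCountGo_ltslash cs.length cs 0 le_rfl]

theorem pvEndswith_lt (cs : List Char) :
    PySem.Chars.endswith cs ['<'] = (cs.getLast? == some '<') := by
  have h1 : (['<'] <:+ cs) ↔ cs.getLast? = some '<' := by
    rw [← List.reverse_prefix]
    cases h : cs.reverse with
    | nil => simp [List.getLast?_eq_head?_reverse, h]
    | cons d u =>
        simp [List.getLast?_eq_head?_reverse, h, List.cons_prefix_cons, eq_comm]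
  show (['<'].isSuffixOf cs) = _
  rw [Bool.eq_iff_iff, List.isSuffixOf_iff_suffix, beq_iff_eq]
  exact h1

-- The heart: A's loop equals B's arithmetic, on char lists.
theorem pvMain (cs : List Char) :
    pvLoopA 0 none cs =
      (cs.count '<' : Int) - pvPairs cs -
        (if cs.getLast? = some '<' then 1 else 0) := by
  induction cs with
  | nil => simp [pvLoopA, pvPairs]
  | cons c t ih =>
      cases t with
      | nil =>
          by_cases hc : c = '<' <;>
            simp [pvLoopA_single, pvPairs, hc]
      | cons d u =>
          rw [pvLoopA_cons2, ih]
          have hpairs : (pvPairs (c :: d :: u) : Int) =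
              (if c = '<' ∧ d = '/' then 1 else 0) + pvPairs (d :: u) := by
            simp [pvPairs, apply_ite (Nat.cast : Nat → Int)]
          have hlast : (c :: d :: u).getLast? = (d :: u).getLast? := by
            simp [List.getLast?_cons_cons]
          rw [hpairs, hlast]
          by_cases hc : c = '<' <;> by_cases hd : d = '/' <;>
            simp [hc, hd] <;> ring

-- ===== VERDICT (by name: the statement is the Claim_ definition above) =====
theorem count_tags_spec : Claim_equal_count_tags := by
  intro text _
  show count_tags text = count_tags_alt text
  unfold count_tags count_tags_alt
  rw [pvLoopA_foldl, pvMain]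
  simp only [PySem.Str.count_eq, PySem.Str.endswith_eq,
    show ("<" : String).toList = ['<'] from rfl,
    show ("</" : String).toList = ['<', '/'] from rfl,
    pvCount_lt, pvCount_ltslash, pvEndswith_lt, beq_iff_eq]
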